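-- pv_equiv track=rewrite | github.com/RuizhiPeng/Design_helper_script | renumber_pdb_chains.py | calculate_offsets
-- ===== SOURCE A (Python) =====
-- def calculate_offsets(chain_info):
--     """
--     Calculate offset for each chain so residues are sequential.
--     Returns dict mapping chain ID to offset value.
--     """
--     offsets = {}
--     next_residue = 1  # Start numbering from 1
--
--     # Sort chains alphabetically to ensure consistent processing
--     sorted_chains = sorted(chain_info.keys())
--
--     for chain_id in sorted_chains:
--         min_res = min(chain_info[chain_id])
--         max_res = max(chain_info[chain_id])
--
--         # Offset to make this chain start at next_residue
--         offsets[chain_id] = next_residue - min_res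
--
--         # Calculate where the next chain should start
--         # Number of residues in current chain
--         num_residues = max_res - min_res + 1
--         next_residue = next_residue + num_residues
--
--     return offsets
-- ===== SOURCE B (Python) =====
-- def calculate_offsets(chain_info):
--     """Each chain's offset computed independently by a closed form:
--     start(c) = 1 + total size of all alphabetically smaller chains."""
--     sizes = {c: max(chain_info[c]) - min(chain_info[c]) + 1 for c in chain_info}
--     return {c: 1 + sum(s for d, s in sizes.items() if d < c) - min(chain_info[c])
--             for c in sorted(chain_info)}
-- ===== Notes on version B (the rewrite author's own statement) =====
-- stated objective: alternative
-- what changed: Replaces A's sequential loop threading a running next_residue accumulator with a closed form computed independently per chain: start(c) = 1 + sum of sizes of all alphabetically smaller chains, read off a sizes table; no state is carried between chains.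
import Mathlib
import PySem

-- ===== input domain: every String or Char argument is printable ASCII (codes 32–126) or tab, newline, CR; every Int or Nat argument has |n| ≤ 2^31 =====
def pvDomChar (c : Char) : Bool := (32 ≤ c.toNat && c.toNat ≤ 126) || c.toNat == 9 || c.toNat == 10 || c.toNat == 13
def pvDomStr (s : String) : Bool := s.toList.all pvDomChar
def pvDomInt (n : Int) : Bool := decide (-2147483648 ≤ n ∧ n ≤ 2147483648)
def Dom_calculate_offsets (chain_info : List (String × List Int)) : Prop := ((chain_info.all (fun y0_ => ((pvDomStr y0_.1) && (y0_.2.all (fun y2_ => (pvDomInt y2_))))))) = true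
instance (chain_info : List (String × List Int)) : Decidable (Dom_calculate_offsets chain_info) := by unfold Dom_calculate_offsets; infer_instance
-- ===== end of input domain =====

-- B drops A's sequential running-total loop: each chain's offset is computed independently by a
-- closed form (start = 1 + total size of all alphabetically smaller chains) (objective: alternative).

-- ===== PORT A =====
-- dict lookup chain_info[c] (a Python dict has unique keys; first match)
def pvLookup (chain_info : List (String × List Int)) (c : String) : List Int :=
  ((chain_info.find? (fun p => p.1 == c)).map Prod.snd).getD []

def calculate_offsets (chain_info : List (String × List Int)) : List (String × Int) :=
  -- offsets = {}; next_residue = 1; sorted_chains = sorted(chain_info.keys())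
  let sorted_chains := PySem.List.sorted (PySem.List.dedup (chain_info.map Prod.fst)) (fun x => x) false
  let st := sorted_chains.foldl (fun (st : PySem.Dict String Int × Int) c =>
      let res := pvLookup chain_info c
      let min_res := (PySem.List.min? res (fun x => x)).getD 0   -- min(...); the ValueError case is excluded by Pre_
      let max_res := (PySem.List.max? res (fun x => x)).getD 0
      (st.1.insert c (st.2 - min_res), st.2 + (max_res - min_res + 1)))
    (PySem.Dict.empty, 1)
  st.1.items

-- ===== PORT B =====
def calculate_offsets_alt (chain_info : List (String × List Int)) : List (String × Int) :=
  -- sizes = {c: max(chain_info[c]) - min(chain_info[c]) + 1 for c in chain_info}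
  let keys := PySem.List.dedup (chain_info.map Prod.fst)
  let sizes := keys.map (fun c =>
      (c, (PySem.List.max? (pvLookup chain_info c) (fun x => x)).getD 0
          - (PySem.List.min? (pvLookup chain_info c) (fun x => x)).getD 0 + 1))
  -- {c: 1 + sum(s for d, s in sizes.items() if d < c) - min(chain_info[c]) for c in sorted(chain_info)}
  (PySem.List.sorted keys (fun x => x) false).map (fun c =>
      (c, 1 + ((sizes.filter (fun p => decide (p.1 < c))).map Prod.snd).sum
          - (PySem.List.min? (pvLookup chain_info c) (fun x => x)).getD 0))

-- ===== PRECONDITION & SPEC =====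
-- Pre_ excludes inputs where some chain has no residues: there Python's min() raises ValueError in both A and B.
def Pre_calculate_offsets (chain_info : List (String × List Int)) : Prop :=
  ∀ p ∈ chain_info, p.2 ≠ []
instance (chain_info : List (String × List Int)) : Decidable (Pre_calculate_offsets chain_info) := by unfold Pre_calculate_offsets; infer_instance

def pvWitness_calculate_offsets : (List (String × List Int)) := [("B", [10, 12]), ("A", [3])]

def Spec_calculate_offsets (chain_info : List (String × List Int)) (out : List (String × Int)) : Prop := out = calculate_offsets_alt chain_info
instance (chain_info : List (String × List Int)) (out : List (String × Int)) : Decidable (Spec_calculate_offsets chain_info out) := by unfold Spec_calculate_offsets; infer_instance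

-- ===== CLAIM (what is proved, stated in full; the proofs are below) =====
def Claim_equal_calculate_offsets : Prop := ∀ (chain_info : List (String × List Int)), Dom_calculate_offsets chain_info → Pre_calculate_offsets chain_info → Spec_calculate_offsets chain_info (calculate_offsets chain_info)

-- ===== LEMMAS AND PROOFS =====
-- per-chain min / max, shared vocabulary of the proof
def pvMn (ci : List (String × List Int)) (c : String) : Int :=
  (PySem.List.min? (pvLookup ci c) (fun x => x)).getD 0
def pvMx (ci : List (String × List Int)) (c : String) : Int :=
  (PySem.List.max? (pvLookup ci c) (fun x => x)).getD 0
def pvSz (ci : List (String × List Int)) (c : String) : Int := pvMx ci c - pvMn ci c + 1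

-- the common intermediate: the output walked left to right with a running start n
def pvOut (ci : List (String × List Int)) : Int → List String → List (String × Int)
  | _, [] => []
  | n, c :: cs => (c, n - pvMn ci c) :: pvOut ci (n + pvSz ci c) cs

theorem pvA_items (ci : List (String × List Int)) :
    ∀ (cs : List String) (d : PySem.Dict String Int) (n : Int),
      cs.Nodup → (∀ c ∈ cs, d.contains c = false) →
      (cs.foldl (fun (st : PySem.Dict String Int × Int) c =>
          (st.1.insert c (st.2 - pvMn ci c), st.2 + pvSz ci c)) (d, n)).1.items
        = d.items ++ pvOut ci n cs := by
  intro cs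
  induction cs with
  | nil => intro d n _ _; simp [pvOut]
  | cons c cs ih =>
    intro d n hnd hfresh
    simp only [List.foldl_cons, pvOut]
    rw [ih _ _ (List.Nodup.of_cons hnd) ?_]
    · rw [PySem.Dict.items_insert_of_not_contains (h := hfresh c (by simp))]
      simp
    · intro c' hc'
      rw [PySem.Dict.contains_insert]
      have : c' ≠ c := by
        intro h; subst h; exact (List.nodup_cons.mp hnd).1 hc'
      simp [this, hfresh c' (List.mem_cons_of_mem _ hc')]

-- the sorted distinct chain ids
def pvChains (ci : List (String × List Int)) : List String :=
  PySem.List.sorted (PySem.List.dedup (ci.map Prod.fst)) (fun x => x) false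

theorem pvChains_nodup (ci : List (String × List Int)) : (pvChains ci).Nodup :=
  (PySem.List.sorted_perm _ _ _).nodup_iff.mpr (PySem.List.nodup_dedup _)

theorem pvChains_sorted_lt (ci : List (String × List Int)) :
    (pvChains ci).Pairwise (· < ·) := by
  have hle : (pvChains ci).Pairwise (fun a b => a ≤ b) :=
    PySem.List.sorted_pairwise (key := fun x => x) _
  exact ((hle.and (pvChains_nodup ci)).imp (fun h => lt_of_le_of_ne h.1 h.2))

theorem pvA_eq (ci : List (String × List Int)) : calculate_offsets ci = pvOut ci 1 (pvChains ci) := by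
  show ((pvChains ci).foldl (fun (st : PySem.Dict String Int × Int) c =>
      (st.1.insert c (st.2 - pvMn ci c), st.2 + (pvMx ci c - pvMn ci c + 1))) (PySem.Dict.empty, 1)).1.items
      = pvOut ci 1 (pvChains ci)
  rw [show (fun (st : PySem.Dict String Int × Int) (c : String) =>
      (st.1.insert c (st.2 - pvMn ci c), st.2 + (pvMx ci c - pvMn ci c + 1)))
      = (fun (st : PySem.Dict String Int × Int) c =>
      (st.1.insert c (st.2 - pvMn ci c), st.2 + pvSz ci c)) from rfl]
  rw [pvA_items ci (pvChains ci) PySem.Dict.empty 1 (pvChains_nodup ci) (fun c _ => PySem.Dict.contains_empty c)]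
  rfl

-- B's closed form over a strictly increasing list equals the running-total walk
theorem pvB_closed (ci : List (String × List Int)) :
    ∀ (cs : List String) (n : Int), cs.Pairwise (· < ·) →
      cs.map (fun c => (c, n + ((cs.filter (fun d => decide (d < c))).map (pvSz ci)).sum - pvMn ci c))
        = pvOut ci n cs := by
  intro cs
  induction cs with
  | nil => intro n _; simp [pvOut]
  | cons c t ih =>
    intro n hp
    have hlt : ∀ d ∈ t, c < d := fun d hd => (List.pairwise_cons.mp hp).1 d hd
    have ht : t.Pairwise (· < ·) := (List.pairwise_cons.mp hp).2
    simp only [List.map_cons, pvOut]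
    -- head: no chain in c :: t is < c
    have hnil : (c :: t).filter (fun d => decide (d < c)) = [] := by
      rw [List.filter_eq_nil_iff]
      intro d hd
      rcases List.mem_cons.mp hd with h | h
      · subst h; simp
      · simpa using not_lt_of_gt (hlt d h)
    rw [hnil]
    -- tail: for e ∈ t, c < e so the filter keeps c
    have htail : t.map (fun e => (e, n + (((c :: t).filter (fun d => decide (d < e))).map (pvSz ci)).sum - pvMn ci e))
          = t.map (fun e => (e, (n + pvSz ci c) + ((t.filter (fun d => decide (d < e))).map (pvSz ci)).sum - pvMn ci e)) := by
        apply List.map_congr_left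
        intro e he
        have hce : c < e := hlt e he
        simp only [List.filter_cons, hce, decide_true, if_true, List.map_cons, List.sum_cons]
        ring_nf
    rw [htail, ih (n + pvSz ci c) ht]
    simp

theorem pvB_eq (ci : List (String × List Int)) : calculate_offsets_alt ci = pvOut ci 1 (pvChains ci) := by
  show (pvChains ci).map (fun c =>
      (c, 1 + ((((PySem.List.dedup (ci.map Prod.fst)).map (fun c => (c, pvMx ci c - pvMn ci c + 1))).filter
            (fun p => decide (p.1 < c))).map Prod.snd).sum - pvMn ci c))
      = pvOut ci 1 (pvChains ci)
  have hsum : ∀ c : String,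
      ((((PySem.List.dedup (ci.map Prod.fst)).map (fun c => (c, pvMx ci c - pvMn ci c + 1))).filter
          (fun p => decide (p.1 < c))).map Prod.snd).sum
        = (((pvChains ci).filter (fun d => decide (d < c))).map (pvSz ci)).sum := by
    intro c
    rw [List.filter_map, List.map_map]
    refine List.Perm.sum_eq (List.Perm.map _ (List.Perm.filter _ ?_))
    exact (PySem.List.sorted_perm _ _ _).symm
  calc (pvChains ci).map (fun c =>
        (c, 1 + ((((PySem.List.dedup (ci.map Prod.fst)).map (fun c => (c, pvMx ci c - pvMn ci c + 1))).filter
              (fun p => decide (p.1 < c))).map Prod.snd).sum - pvMn ci c))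
      = (pvChains ci).map (fun c =>
        (c, 1 + (((pvChains ci).filter (fun d => decide (d < c))).map (pvSz ci)).sum - pvMn ci c)) := by
        apply List.map_congr_left; intro c _; rw [hsum c]
    _ = pvOut ci 1 (pvChains ci) := pvB_closed ci (pvChains ci) 1 (pvChains_sorted_lt ci)

-- ===== VERDICT (by name: the statement is the Claim_ definition above) =====
theorem calculate_offsets_spec : Claim_equal_calculate_offsets := by
  intro ci _ _
  unfold Spec_calculate_offsets
  rw [pvA_eq, pvB_eq]
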